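-- pv_equiv track=rewrite | github.com/ericjardon/python-coding-problems | bfs/grids/land_mines.py | solve
-- ===== SOURCE A (Python) =====
-- from collections import deque
--
-- def solve(map, M, N):
--     # Use a 2d array to keep track of distances to each cell
--     distance = [[-1 for _ in range(N)] for _ in range(M)]
--
--     # Use two queues: one for the vertical index and another for horizontal
--     qi = deque()
--     qj = deque()        # this approach avoids packing-unpacking
--
--     # Find and enqueue all cells with a landmine
--     for i in range(M):
--         for j in range(N):
--             # If cell has a mine
--             if map[i][j] == 'M':
--                 qi.append(i)
--                 qj.append(j)
--                 # Base case: mines have distance zero to closest mine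
--                 distance[i][j] = 0
--
--     # For exploring in four directions
--     x = [1, 0, -1, 0]
--     y = [0, 1, 0, -1]
--
--     # Breadth First Search for every landmine.
--     # The first landmine to update a cell is also the closest to it.
--     while qi:   # qi and qj always have same length
--         row = qi.popleft()
--         col = qj.popleft()
--
--         curr_dist = distance[row][col]
--
--         for i in range(4):
--             next_r = row + y[i]
--             next_c = col + x[i]
--
--             # If cell exists in map
--             if (0 <= next_r < M) and (0 <= next_c < N):
--
--                 # If cell is open and first time encountered, update distance to it
--                 if map[next_r][next_c] == 'O' \
--                         and distance[next_r][next_c] == -1: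
--                     distance[next_r][next_c] = curr_dist + 1
--
--                     qi.append(next_r)
--                     qj.append(next_c)
--
--     # Return the map of all distances
--     return distance
-- ===== SOURCE B (Python) =====
-- def solve(map, M, N):
--     # Level-synchronous BFS: one frontier list per distance level instead of queues.
--     distance = [[-1 for _ in range(N)] for _ in range(M)]
--
--     frontier = []
--     for i in range(M):
--         for j in range(N):
--             if map[i][j] == 'M':
--                 distance[i][j] = 0
--                 frontier.append((i, j))
--
--     dist = 0
--     while frontier:
--         next_frontier = []
--         for (r, c) in frontier:
--             for (dr, dc) in ((0, 1), (1, 0), (0, -1), (-1, 0)):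
--                 nr, nc = r + dr, c + dc
--                 if 0 <= nr < M and 0 <= nc < N \
--                         and map[nr][nc] == 'O' and distance[nr][nc] == -1:
--                     distance[nr][nc] = dist + 1
--                     next_frontier.append((nr, nc))
--         dist += 1
--         frontier = next_frontier
--
--     return distance
-- ===== Notes on version B (the rewrite author's own statement) =====
-- stated objective: alternative
-- what changed: Replaces A's two parallel FIFO deques carrying per-cell distances read back from the grid with a level-synchronous BFS: a frontier list per distance level, an explicit level counter, and a next-frontier list built by one pass over the current frontier.
import Mathlib
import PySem

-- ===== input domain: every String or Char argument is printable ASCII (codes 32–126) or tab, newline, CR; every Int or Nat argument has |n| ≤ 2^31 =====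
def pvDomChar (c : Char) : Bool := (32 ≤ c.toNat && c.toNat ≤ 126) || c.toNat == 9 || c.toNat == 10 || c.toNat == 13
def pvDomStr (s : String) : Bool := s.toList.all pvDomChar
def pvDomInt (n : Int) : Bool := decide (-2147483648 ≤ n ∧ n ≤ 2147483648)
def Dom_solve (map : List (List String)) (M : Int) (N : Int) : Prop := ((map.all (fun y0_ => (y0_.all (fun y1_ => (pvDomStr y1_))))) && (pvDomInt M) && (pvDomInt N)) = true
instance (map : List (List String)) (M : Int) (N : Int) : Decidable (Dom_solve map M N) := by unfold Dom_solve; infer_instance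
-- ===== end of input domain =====

-- B replaces A's two parallel FIFO deques (distances read back from the grid cell by cell)
-- by a level-synchronous BFS: a frontier list per distance level and a level counter;
-- objective: alternative decomposition, same O(M*N) cost.

-- ===== PORT A =====
-- Shared cell accessors for 'distance[i][j]' / 'map[i][j]' (both Pythons index this way).
-- Indices used at runtime are always nonnegative and in range (ranges/bounds guards),
-- where these are exact; the defaults are unreachable on inputs satisfying Pre_solve.
def pvDget (g : List (List Int)) (i j : Int) : Int := (g.getD i.toNat []).getD j.toNat (-2)
def pvMget (m : List (List String)) (i j : Int) : String := (m.getD i.toNat []).getD j.toNat ""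
def pvDset (g : List (List Int)) (i j : Int) (v : Int) : List (List Int) :=
  g.modify i.toNat (fun row => row.set j.toNat v)
-- number of cells still holding -1 (used only as the totality fuel bound of the loops)
def pvCn (g : List (List Int)) : Nat := (g.map (fun row => row.count (-1))).sum

-- one iteration 'i' of A's inner 'for i in range(4)' (x/y direction tables, two queues)
def aStep (map : List (List String)) (M N : Int) (r c curr : Int)
    (s : List Int × List Int × List (List Int)) (i : Int) :
    List Int × List Int × List (List Int) :=
  let x : List Int := [1, 0, -1, 0]
  let y : List Int := [0, 1, 0, -1]
  let nr := r + PySem.List.pyGetD y i 0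
  let nc := c + PySem.List.pyGetD x i 0
  if (0 ≤ nr ∧ nr < M) ∧ (0 ≤ nc ∧ nc < N) then
    if pvMget map nr nc = "O" ∧ pvDget s.2.2 nr nc = -1 then
      (s.1 ++ [nr], s.2.1 ++ [nc], pvDset s.2.2 nr nc (curr + 1))
    else s
  else s

-- A's 'while qi:' loop; fuel only makes it total (popping an empty qj is unreachable)
def loopA (map : List (List String)) (M N : Int) :
    Nat → List Int → List Int → List (List Int) → List (List Int)
  | 0, _, _, d => d
  | _ + 1, [], _, d => d
  | _ + 1, _ :: _, [], d => d
  | f + 1, r :: qi, c :: qj, d =>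
    let curr := pvDget d r c
    let s := (PySem.List.pyRange 0 4 1).foldl (aStep map M N r c curr) (qi, qj, d)
    loopA map M N f s.1 s.2.1 s.2.2

def solve (map : List (List String)) (M : Int) (N : Int) : List (List Int) :=
  let distance := (PySem.List.pyRange 0 M 1).map
    (fun _ => (PySem.List.pyRange 0 N 1).map (fun _ => (-1 : Int)))
  let s := (PySem.List.pyRange 0 M 1).foldl (fun s i =>
      (PySem.List.pyRange 0 N 1).foldl (fun s j =>
        if pvMget map i j = "M" then (s.1 ++ [i], s.2.1 ++ [j], pvDset s.2.2 i j 0) else s) s)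
    (([] : List Int), ([] : List Int), distance)
  loopA map M N (s.1.length + 2 * pvCn s.2.2 + 1) s.1 s.2.1 s.2.2

-- ===== PORT B =====
-- one neighbour direction of B's inner 'for (dr, dc) in ((0,1),(1,0),(0,-1),(-1,0))'
def bStepDir (map : List (List String)) (M N dist : Int) (r c : Int)
    (s : List (List Int) × List (Int × Int)) (dd : Int × Int) :
    List (List Int) × List (Int × Int) :=
  let nr := r + dd.1
  let nc := c + dd.2
  if (0 ≤ nr ∧ nr < M) ∧ (0 ≤ nc ∧ nc < N) ∧ pvMget map nr nc = "O" ∧ pvDget s.1 nr nc = -1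
  then (pvDset s.1 nr nc (dist + 1), s.2 ++ [(nr, nc)])
  else s

-- one frontier cell (r, c): visit its four neighbours
def bStepCell (map : List (List String)) (M N dist : Int)
    (s : List (List Int) × List (Int × Int)) (p : Int × Int) :
    List (List Int) × List (Int × Int) :=
  ([((0 : Int), (1 : Int)), (1, 0), (0, -1), (-1, 0)]).foldl (bStepDir map M N dist p.1 p.2) s

-- B's 'while frontier:' level loop; fuel only makes it total
def loopB (map : List (List String)) (M N : Int) :
    Nat → List (Int × Int) → Int → List (List Int) → List (List Int)
  | 0, _, _, d => d
  | _ + 1, [], _, d => d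
  | f + 1, p :: F, dist, d =>
    let s := (p :: F).foldl (bStepCell map M N dist) (d, ([] : List (Int × Int)))
    loopB map M N f s.2 (dist + 1) s.1

def solve_alt (map : List (List String)) (M : Int) (N : Int) : List (List Int) :=
  let distance := (PySem.List.pyRange 0 M 1).map
    (fun _ => (PySem.List.pyRange 0 N 1).map (fun _ => (-1 : Int)))
  let s := (PySem.List.pyRange 0 M 1).foldl (fun s i =>
      (PySem.List.pyRange 0 N 1).foldl (fun s j =>
        if pvMget map i j = "M" then (pvDset s.1 i j 0, s.2 ++ [(i, j)]) else s) s)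
    (distance, ([] : List (Int × Int)))
  loopB map M N (pvCn s.1 + 1) s.2 0 s.1

-- ===== PRECONDITION & SPEC =====
-- Pre_solve = exactly the inputs where Python A returns: when M > 0 and N > 0 it indexes
-- map[i][j] for all 0 ≤ i < M, 0 ≤ j < N, so the first M rows must exist and have ≥ N cells
-- (otherwise IndexError); with M ≤ 0 or N ≤ 0 no cell is ever indexed.
def Pre_solve (map : List (List String)) (M : Int) (N : Int) : Prop :=
  N ≤ 0 ∨ M ≤ 0 ∨ (M ≤ (map.length : Int) ∧ ∀ row ∈ map.take M.toNat, N ≤ (row.length : Int))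
instance (map : List (List String)) (M : Int) (N : Int) : Decidable (Pre_solve map M N) := by
  unfold Pre_solve; infer_instance

def pvWitness_solve : List (List String) × Int × Int := ([["M", "O"], ["O", "O"]], 2, 2)

def Spec_solve (map : List (List String)) (M : Int) (N : Int) (out : List (List Int)) : Prop := out = solve_alt map M N
instance (map : List (List String)) (M : Int) (N : Int) (out : List (List Int)) : Decidable (Spec_solve map M N out) := by unfold Spec_solve; infer_instance

-- ===== CLAIM (what is proved, stated in full; the proofs are below) =====
def Claim_equal_solve : Prop := ∀ (map : List (List String)) (M : Int) (N : Int), Dom_solve map M N → Pre_solve map M N → Spec_solve map M N (solve map M N)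

-- ===== LEMMAS AND PROOFS =====

def pvInR (M N : Int) (p : Int × Int) : Prop := 0 ≤ p.1 ∧ p.1 < M ∧ 0 ≤ p.2 ∧ p.2 < N

def pvShape (M N : Int) (g : List (List Int)) : Prop :=
  g.length = M.toNat ∧ ∀ row ∈ g, row.length = N.toNat

lemma pvShape_set {M N : Int} {g : List (List Int)} (h : pvShape M N g) (i j : Int) (v : Int) :
    pvShape M N (pvDset g i j v) := by
  refine ⟨by simpa [pvDset, List.length_modify] using h.1, ?_⟩
  intro row hrow
  rw [List.mem_iff_getElem] at hrow
  obtain ⟨k, hk, heq⟩ := hrow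
  simp only [pvDset] at hk heq
  rw [List.getElem_modify] at heq
  have hkg : k < g.length := by simpa [pvDset, List.length_modify] using hk
  split at heq
  · rw [← heq]
    simpa using h.2 g[k] (List.getElem_mem hkg)
  · exact heq ▸ h.2 g[k] (List.getElem_mem hkg)

lemma pvDget_set_self {M N : Int} {g : List (List Int)} {i j : Int} (hs : pvShape M N g)
    (hr : pvInR M N (i, j)) (v : Int) : pvDget (pvDset g i j v) i j = v := by
  obtain ⟨h0i, hiM, h0j, hjN⟩ := hr
  have hi : i.toNat < g.length := by rw [hs.1]; omega
  have hrowlen : g[i.toNat].length = N.toNat := hs.2 _ (List.getElem_mem hi)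
  have hj : j.toNat < g[i.toNat].length := by rw [hrowlen]; omega
  simp only [pvDget, pvDset, List.getD_eq_getElem?_getD, List.getElem?_modify]
  rw [List.getElem?_eq_getElem hi]
  simp [hj]

lemma pvDget_set_ne {g : List (List Int)} {r c i j : Int} (h0r : 0 ≤ r) (h0c : 0 ≤ c)
    (h0i : 0 ≤ i) (h0j : 0 ≤ j) (hne : (r, c) ≠ (i, j)) (v : Int) :
    pvDget (pvDset g i j v) r c = pvDget g r c := by
  simp only [pvDget, pvDset, List.getD_eq_getElem?_getD, List.getElem?_modify]
  by_cases hri : i.toNat = r.toNat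
  · have hri' : r = i := by omega
    have hcj : c ≠ j := by
      intro h; exact hne (by rw [hri', h])
    cases hgr : g[r.toNat]? with
    | none => simp
    | some row => simp [hri, show ¬ j.toNat = c.toNat by omega]
  · cases hgr : g[r.toNat]? with
    | none => simp
    | some row => simp [hri]

lemma pvCountSetRow : ∀ (l : List Int) (j : Nat) (v : Int) (hj : j < l.length), l[j] = -1 →
    v ≠ -1 → (l.set j v).count (-1) + 1 = l.count (-1) := by
  intro l
  induction l with
  | nil => intro j v h; simp at h
  | cons a l ih =>
    intro j v hj ha hv
    cases j with
    | zero =>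
      simp only [List.getElem_cons_zero] at ha
      simp [List.set_cons_zero, ha, hv]
    | succ j =>
      simp only [List.getElem_cons_succ] at ha
      have := ih j v (by simpa using hj) ha hv
      simp only [List.set_cons_succ, List.count_cons]
      split <;> omega

lemma pvCnModify : ∀ (g : List (List Int)) (i : Nat) (f : List Int → List Int) (hi : i < g.length),
    pvCn (g.modify i f) + (g[i]).count (-1) = pvCn g + (f (g[i])).count (-1) := by
  intro g
  induction g with
  | nil => intro i f h; simp at h
  | cons a g ih =>
    intro i f hi
    cases i with
    | zero => simp [pvCn, List.modify]; omega
    | succ i =>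
      have := ih i f (by simpa using hi)
      simp only [List.getElem_cons_succ, List.modify_succ_cons]
      simp only [pvCn, List.map_cons, List.sum_cons] at this ⊢
      omega

lemma pvCn_set {M N : Int} {g : List (List Int)} {i j : Int} (hs : pvShape M N g)
    (hr : pvInR M N (i, j)) (hm : pvDget g i j = -1) {v : Int} (hv : v ≠ -1) :
    pvCn (pvDset g i j v) + 1 = pvCn g := by
  obtain ⟨h0i, hiM, h0j, hjN⟩ := hr
  have hi : i.toNat < g.length := by rw [hs.1]; omega
  have hrowlen : g[i.toNat].length = N.toNat := hs.2 _ (List.getElem_mem hi)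
  have hj : j.toNat < g[i.toNat].length := by rw [hrowlen]; omega
  have hcell : g[i.toNat][j.toNat] = -1 := by
    simpa only [pvDget, List.getD_eq_getElem _ _ hi, List.getD_eq_getElem _ _ hj] using hm
  have h1 := pvCountSetRow g[i.toNat] j.toNat v hj hcell hv
  have h2 := pvCnModify g i.toNat (fun row => row.set j.toNat v) hi
  simp only [pvDset]
  omega

-- the state of the inner/level folds evolves by setting -1 cells to dist+1 and recording them
def pvGood (M N dist : Int) (d d' : List (List Int)) (δ : List (Int × Int)) : Prop :=
  pvShape M N d' ∧ pvCn d' + δ.length = pvCn d ∧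
  (∀ r c : Int, 0 ≤ r → 0 ≤ c → pvDget d r c ≠ -1 → pvDget d' r c = pvDget d r c) ∧
  (∀ p ∈ δ, pvInR M N p ∧ pvDget d' p.1 p.2 = dist + 1)

lemma pvGood_comp {M N dist : Int} {d d1 d2 : List (List Int)} {δ1 δ2 : List (Int × Int)}
    (hd : 0 ≤ dist) (h1 : pvGood M N dist d d1 δ1) (h2 : pvGood M N dist d1 d2 δ2) :
    pvGood M N dist d d2 (δ1 ++ δ2) := by
  obtain ⟨s1, c1, p1, v1⟩ := h1
  obtain ⟨s2, c2, p2, v2⟩ := h2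
  refine ⟨s2, by simp; omega, fun r c hr hc hm => by rw [p2 r c hr hc (by rw [p1 r c hr hc hm]; exact hm), p1 r c hr hc hm], ?_⟩
  intro p hp
  rcases List.mem_append.1 hp with hp | hp
  · obtain ⟨hin, hv⟩ := v1 p hp
    exact ⟨hin, by rw [p2 p.1 p.2 hin.1 hin.2.2.1 (by rw [hv]; omega), hv]⟩
  · exact v2 p hp

-- nf-append shape of B's step functions: the grid part ignores the collected list
lemma foldl_nf {G P X : Type} (f : G × List P → X → G × List P)
    (hf : ∀ d nf x, f (d, nf) x = ((f (d, []) x).1, nf ++ (f (d, []) x).2)) :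
    ∀ (l : List X) (d : G) (nf : List P),
      l.foldl f (d, nf) = ((l.foldl f (d, []) ).1, nf ++ (l.foldl f (d, [])).2) := by
  intro l
  induction l with
  | nil => intro d nf; simp
  | cons x l ih =>
    intro d nf
    simp only [List.foldl_cons]
    rw [hf d nf x, ih (f (d, []) x).1 (nf ++ (f (d, []) x).2)]
    rw [show f (d, []) x = ((f (d, []) x).1, (f (d, []) x).2) from rfl]
    rw [ih (f (d, []) x).1 (f (d, []) x).2]
    simp

lemma bStepDir_nf (map : List (List String)) (M N dist r c : Int)
    (d : List (List Int)) (nf : List (Int × Int)) (dd : Int × Int) :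
    bStepDir map M N dist r c (d, nf) dd
      = ((bStepDir map M N dist r c (d, []) dd).1, nf ++ (bStepDir map M N dist r c (d, []) dd).2) := by
  unfold bStepDir; dsimp only; split <;> simp

lemma bStepCell_nf (map : List (List String)) (M N dist : Int)
    (d : List (List Int)) (nf : List (Int × Int)) (p : Int × Int) :
    bStepCell map M N dist (d, nf) p
      = ((bStepCell map M N dist (d, []) p).1, nf ++ (bStepCell map M N dist (d, []) p).2) := by
  unfold bStepCell
  exact foldl_nf _ (fun d nf dd => bStepDir_nf map M N dist p.1 p.2 d nf dd) _ d nf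

lemma pvGood_stepdir {map : List (List String)} {M N dist : Int} {r c : Int}
    {d : List (List Int)} (hs : pvShape M N d) (hd : 0 ≤ dist) (dd : Int × Int) :
    pvGood M N dist d (bStepDir map M N dist r c (d, []) dd).1 (bStepDir map M N dist r c (d, []) dd).2 := by
  unfold bStepDir
  dsimp only
  split
  case isTrue h =>
    obtain ⟨⟨h1, h2⟩, ⟨h3, h4⟩, h5, h6⟩ := h
    have hin : pvInR M N (r + dd.1, c + dd.2) := ⟨h1, h2, h3, h4⟩
    refine ⟨pvShape_set hs _ _ _, ?_, ?_, ?_⟩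
    · simpa using pvCn_set hs hin h6 (by omega)
    · intro r' c' hr' hc' hm
      refine pvDget_set_ne hr' hc' h1 h3 (fun heq => ?_) _
      rw [show r' = r + dd.1 by exact congrArg Prod.fst heq, show c' = c + dd.2 by exact congrArg Prod.snd heq] at hm
      exact hm h6
    · intro p hp
      simp only [List.nil_append, List.mem_singleton] at hp
      subst hp
      exact ⟨hin, by simpa using pvDget_set_self hs hin (dist + 1)⟩
  case isFalse h =>
    exact ⟨hs, by simp, fun _ _ _ _ _ => rfl, by simp⟩

lemma pvGood_foldgen {M N dist : Int} {X : Type} (f : List (List Int) × List (Int × Int) → X → List (List Int) × List (Int × Int))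
    (hnf : ∀ d nf x, f (d, nf) x = ((f (d, []) x).1, nf ++ (f (d, []) x).2))
    (hgood : ∀ d x, pvShape M N d → pvGood M N dist d (f (d, []) x).1 (f (d, []) x).2)
    (hd : 0 ≤ dist) :
    ∀ (l : List X) (d : List (List Int)), pvShape M N d →
      pvGood M N dist d (l.foldl f (d, [])).1 (l.foldl f (d, [])).2 := by
  intro l
  induction l with
  | nil => intro d hs; exact ⟨hs, by simp, fun _ _ _ _ h => rfl, by simp⟩
  | cons x l ih =>
    intro d hs
    have h1 := hgood d x hs
    simp only [List.foldl_cons]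
    rw [show f (d, []) x = ((f (d, []) x).1, (f (d, []) x).2) from rfl, foldl_nf f hnf]
    exact pvGood_comp hd h1 (ih (f (d, []) x).1 h1.1)

lemma pvGood_cell {map : List (List String)} {M N dist : Int}
    {d : List (List Int)} (hs : pvShape M N d) (hd : 0 ≤ dist) (p : Int × Int) :
    pvGood M N dist d (bStepCell map M N dist (d, []) p).1 (bStepCell map M N dist (d, []) p).2 := by
  unfold bStepCell
  exact pvGood_foldgen _ (fun d nf dd => bStepDir_nf map M N dist p.1 p.2 d nf dd)
    (fun d dd hsd => pvGood_stepdir hsd hd dd) hd _ d hs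

lemma pvGood_level {map : List (List String)} {M N dist : Int}
    {d : List (List Int)} (hs : pvShape M N d) (hd : 0 ≤ dist) (F : List (Int × Int)) :
    pvGood M N dist d (F.foldl (bStepCell map M N dist) (d, [])).1 (F.foldl (bStepCell map M N dist) (d, [])).2 :=
  pvGood_foldgen _ (fun d nf p => bStepCell_nf map M N dist d nf p)
    (fun d p hsd => pvGood_cell hsd hd p) hd F d hs

-- A's four-direction scan of one popped cell equals B's four-direction scan of that cell
lemma pvStepDirRel (map : List (List String)) (M N r c dist : Int) (qi qj : List Int)
    (d : List (List Int)) (F : List (Int × Int)) (i : Int) (dd : Int × Int)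
    (hy : PySem.List.pyGetD [0, 1, 0, -1] i 0 = dd.1)
    (hx : PySem.List.pyGetD [1, 0, -1, 0] i 0 = dd.2) :
    aStep map M N r c dist (qi ++ F.map Prod.fst, qj ++ F.map Prod.snd, d) i
      = (qi ++ ((bStepDir map M N dist r c (d, F) dd).2).map Prod.fst,
         qj ++ ((bStepDir map M N dist r c (d, F) dd).2).map Prod.snd,
         (bStepDir map M N dist r c (d, F) dd).1) := by
  unfold aStep bStepDir
  dsimp only
  rw [hx, hy]
  split_ifs <;> simp_all [List.append_assoc]

lemma pvStep4 (map : List (List String)) (M N : Int) (r c dist : Int)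
    (qi qj : List Int) (d : List (List Int)) :
    (PySem.List.pyRange 0 4 1).foldl (aStep map M N r c dist) (qi, qj, d)
      = (qi ++ ((bStepCell map M N dist (d, []) (r, c)).2).map Prod.fst,
         qj ++ ((bStepCell map M N dist (d, []) (r, c)).2).map Prod.snd,
         (bStepCell map M N dist (d, []) (r, c)).1) := by
  have hr4 : PySem.List.pyRange 0 4 1 = [0, 1, 2, 3] := by decide
  rw [hr4]
  unfold bStepCell
  simp only [List.foldl_cons, List.foldl_nil]
  rw [show ((qi, qj, d) : List Int × List Int × List (List Int))
      = (qi ++ (([] : List (Int × Int)).map Prod.fst), qj ++ (([] : List (Int × Int)).map Prod.snd), d) by simp]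
  rw [pvStepDirRel map M N r c dist qi qj d [] 0 (0, 1) (by decide) (by decide)]
  rw [pvStepDirRel map M N r c dist qi qj _ _ 1 (1, 0) (by decide) (by decide)]
  rw [pvStepDirRel map M N r c dist qi qj _ _ 2 (0, -1) (by decide) (by decide)]
  rw [pvStepDirRel map M N r c dist qi qj _ _ 3 (-1, 0) (by decide) (by decide)]

lemma loopA_cons (map : List (List String)) (M N : Int) (f : Nat) (r c : Int)
    (qi qj : List Int) (d : List (List Int)) :
    loopA map M N (f + 1) (r :: qi) (c :: qj) d
      = (fun s => loopA map M N f s.1 s.2.1 s.2.2)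
          ((PySem.List.pyRange 0 4 1).foldl (aStep map M N r c (pvDget d r c)) (qi, qj, d)) := rfl

lemma loopB_cons (map : List (List String)) (M N : Int) (f : Nat) (p : Int × Int)
    (F : List (Int × Int)) (dist : Int) (d : List (List Int)) :
    loopB map M N (f + 1) (p :: F) dist d
      = (fun s => loopB map M N f s.2 (dist + 1) s.1)
          ((p :: F).foldl (bStepCell map M N dist) (d, ([] : List (Int × Int)))) := rfl


-- processing one whole level through A's queue = B's level fold
lemma pvLevel (map : List (List String)) (M N dist : Int) (hd : 0 ≤ dist) :
    ∀ (F NF : List (Int × Int)) (d : List (List Int)) (fA : Nat),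
      pvShape M N d →
      (∀ p ∈ F, pvInR M N p ∧ pvDget d p.1 p.2 = dist) →
      (∀ p ∈ NF, pvInR M N p ∧ pvDget d p.1 p.2 = dist + 1) →
      loopA map M N (fA + F.length) ((F ++ NF).map Prod.fst) ((F ++ NF).map Prod.snd) d
        = loopA map M N fA
            ((NF ++ (F.foldl (bStepCell map M N dist) (d, [])).2).map Prod.fst)
            ((NF ++ (F.foldl (bStepCell map M N dist) (d, [])).2).map Prod.snd)
            (F.foldl (bStepCell map M N dist) (d, [])).1 := by
  intro F
  induction F with
  | nil =>
    intro NF d fA _ _ _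
    simp
  | cons p F ih =>
    intro NF d fA hs hF hNF
    have hp := hF p List.mem_cons_self
    have hlen : fA + (p :: F).length = (fA + F.length) + 1 := by simp; omega
    rw [hlen]
    simp only [List.cons_append, List.map_cons]
    rw [loopA_cons, hp.2, pvStep4]
    simp only [Prod.mk.eta]
    have hg := pvGood_cell (map := map) hs hd p
    set d1 := (bStepCell map M N dist (d, ([] : List (Int × Int))) p).1 with hd1
    set δ := (bStepCell map M N dist (d, ([] : List (Int × Int))) p).2 with hδ
    have hF' : ∀ q ∈ F, pvInR M N q ∧ pvDget d1 q.1 q.2 = dist := by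
      intro q hqm
      obtain ⟨hin, hv⟩ := hF q (List.mem_cons_of_mem p hqm)
      exact ⟨hin, by rw [hg.2.2.1 q.1 q.2 hin.1 hin.2.2.1 (by rw [hv]; omega), hv]⟩
    have hNF' : ∀ q ∈ NF ++ δ, pvInR M N q ∧ pvDget d1 q.1 q.2 = dist + 1 := by
      intro q hqm
      rcases List.mem_append.1 hqm with hqm | hqm
      · obtain ⟨hin, hv⟩ := hNF q hqm
        exact ⟨hin, by rw [hg.2.2.1 q.1 q.2 hin.1 hin.2.2.1 (by rw [hv]; omega), hv]⟩
      · exact hg.2.2.2 q hqm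
    have hq1 : (F ++ NF).map Prod.fst ++ δ.map Prod.fst = (F ++ (NF ++ δ)).map Prod.fst := by simp
    have hq2 : (F ++ NF).map Prod.snd ++ δ.map Prod.snd = (F ++ (NF ++ δ)).map Prod.snd := by simp
    rw [hq1, hq2, ih (NF ++ δ) d1 fA hg.1 hF' hNF']
    have hfold : (p :: F).foldl (bStepCell map M N dist) (d, ([] : List (Int × Int)))
        = ((F.foldl (bStepCell map M N dist) (d1, [])).1,
           δ ++ (F.foldl (bStepCell map M N dist) (d1, [])).2) := by
      rw [List.foldl_cons,
        show bStepCell map M N dist (d, ([] : List (Int × Int))) p = (d1, δ) from rfl,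
        foldl_nf _ (fun d nf p => bStepCell_nf map M N dist d nf p) F d1 δ]
    rw [hfold]
    simp [List.append_assoc]

lemma pvMain (map : List (List String)) (M N : Int) :
    ∀ (fB : Nat) (F : List (Int × Int)) (dist : Int) (d : List (List Int)) (fA : Nat),
      pvShape M N d → 0 ≤ dist →
      (∀ p ∈ F, pvInR M N p ∧ pvDget d p.1 p.2 = dist) →
      F.length + pvCn d ≤ fA → pvCn d + 1 ≤ fB →
      loopA map M N fA (F.map Prod.fst) (F.map Prod.snd) d = loopB map M N fB F dist d := by
  intro fB
  induction fB with
  | zero => intro F dist d fA _ _ _ _ hfb; omega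
  | succ fB ih =>
    intro F dist d fA hs hd hF hfa hfb
    cases F with
    | nil => cases fA <;> simp [loopA, loopB]
    | cons p F =>
      have hsplit : fA = (fA - (p :: F).length) + (p :: F).length := by
        have : (p :: F).length ≤ fA := by omega
        omega
      have hlvl := pvLevel map M N dist hd (p :: F) [] d (fA - (p :: F).length) hs hF (by simp)
      simp only [List.append_nil, List.nil_append] at hlvl
      rw [hsplit, hlvl, loopB_cons]
      simp only [List.append_nil]
      have hg := pvGood_level (map := map) hs hd (p :: F)
      set s := (p :: F).foldl (bStepCell map M N dist) (d, ([] : List (Int × Int))) with hsdef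
      cases hδ : s.2 with
      | nil =>
        cases fB <;> cases fA - (p :: F).length <;> simp [loopA, loopB]
      | cons q δ =>
        rw [← hδ]
        refine ih s.2 (dist + 1) s.1 (fA - (p :: F).length) hg.1 (by omega) hg.2.2.2 ?_ ?_
        · have h1 := hg.2.1
          have h2 : (p :: F).length + pvCn d ≤ fA := hfa
          omega
        · have h1 := hg.2.1
          have h2 : 1 ≤ s.2.length := by rw [hδ]; simp
          omega

-- relation between the two seeding scans, with the invariants the BFS needs
lemma pvFoldlRel {α β γ : Type} (f : α → γ → α) (g : β → γ → β) (R : α → β → Prop)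
    (l : List γ) (h : ∀ a b x, x ∈ l → R a b → R (f a x) (g b x)) :
    ∀ a b, R a b → R (l.foldl f a) (l.foldl g b) := by
  induction l with
  | nil => intro a b hr; exact hr
  | cons x l ih =>
    intro a b hr
    exact ih (fun a b y hy => h a b y (List.mem_cons_of_mem x hy)) _ _ (h a b x List.mem_cons_self hr)

-- A's seeding scan (the double loop of 'solve'), as a named value
def pvSeedA (map : List (List String)) (M N : Int) : List Int × List Int × List (List Int) :=
  (PySem.List.pyRange 0 M 1).foldl (fun s i =>
      (PySem.List.pyRange 0 N 1).foldl (fun s j =>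
        if pvMget map i j = "M" then (s.1 ++ [i], s.2.1 ++ [j], pvDset s.2.2 i j 0) else s) s)
    (([] : List Int), ([] : List Int),
      (PySem.List.pyRange 0 M 1).map (fun _ => (PySem.List.pyRange 0 N 1).map (fun _ => (-1 : Int))))

-- B's seeding scan (the double loop of 'solve_alt'), as a named value
def pvSeedB (map : List (List String)) (M N : Int) : List (List Int) × List (Int × Int) :=
  (PySem.List.pyRange 0 M 1).foldl (fun s i =>
      (PySem.List.pyRange 0 N 1).foldl (fun s j =>
        if pvMget map i j = "M" then (pvDset s.1 i j 0, s.2 ++ [(i, j)]) else s) s)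
    ((PySem.List.pyRange 0 M 1).map (fun _ => (PySem.List.pyRange 0 N 1).map (fun _ => (-1 : Int))),
      ([] : List (Int × Int)))

def pvSeedRel (M N : Int) (a : List Int × List Int × List (List Int))
    (b : List (List Int) × List (Int × Int)) : Prop :=
  a.1 = b.2.map Prod.fst ∧ a.2.1 = b.2.map Prod.snd ∧ a.2.2 = b.1 ∧
    pvShape M N b.1 ∧ ∀ p ∈ b.2, pvInR M N p ∧ pvDget b.1 p.1 p.2 = 0

lemma pvSeedStep (map : List (List String)) {M N i j : Int} (h0i : 0 ≤ i) (hiM : i < M)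
    (h0j : 0 ≤ j) (hjN : j < N) (a : List Int × List Int × List (List Int))
    (b : List (List Int) × List (Int × Int)) (h : pvSeedRel M N a b) :
    pvSeedRel M N
      (if pvMget map i j = "M" then (a.1 ++ [i], a.2.1 ++ [j], pvDset a.2.2 i j 0) else a)
      (if pvMget map i j = "M" then (pvDset b.1 i j 0, b.2 ++ [(i, j)]) else b) := by
  obtain ⟨e1, e2, e3, hs, hp⟩ := h
  split_ifs with hm
  · have hin : pvInR M N (i, j) := ⟨h0i, hiM, h0j, hjN⟩
    refine ⟨by simp [e1], by simp [e2], by rw [e3], pvShape_set hs _ _ _, ?_⟩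
    intro p hpm
    rcases List.mem_append.1 hpm with hpm | hpm
    · obtain ⟨hinp, hv⟩ := hp p hpm
      by_cases hpe : p = (i, j)
      · subst hpe
        exact ⟨hinp, by simpa using pvDget_set_self hs hin 0⟩
      · exact ⟨hinp,
          by rw [pvDget_set_ne hinp.1 hinp.2.2.1 h0i h0j
              (fun hq => hpe ((Prod.mk.eta).symm.trans hq)) 0, hv]⟩
    · simp only [List.mem_singleton] at hpm
      subst hpm
      exact ⟨hin, by simpa using pvDget_set_self hs hin 0⟩
  · exact ⟨e1, e2, e3, hs, hp⟩

lemma pvSeed (map : List (List String)) (M N : Int) :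
    pvSeedRel M N (pvSeedA map M N) (pvSeedB map M N) := by
  unfold pvSeedA pvSeedB
  refine pvFoldlRel _ _ _ _ ?_ _ _ ?_
  · intro a b i hi h
    rw [PySem.List.mem_pyRange_one] at hi
    refine pvFoldlRel _ _ _ _ ?_ _ _ h
    intro a b j hj h
    rw [PySem.List.mem_pyRange_one] at hj
    exact pvSeedStep map hi.1 hi.2 hj.1 hj.2 a b h
  · refine ⟨rfl, rfl, rfl, ⟨?_, ?_⟩, by simp⟩
    · simp [PySem.List.length_pyRange_one]
    · intro row hrow
      obtain ⟨x, _, hrow⟩ := List.mem_map.1 hrow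
      rw [← hrow]
      simp [PySem.List.length_pyRange_one]

theorem pvEqual (map : List (List String)) (M N : Int) : solve map M N = solve_alt map M N := by
  obtain ⟨e1, e2, e3, hs, hF⟩ := pvSeed map M N
  have hA : solve map M N
      = loopA map M N ((pvSeedA map M N).1.length + 2 * pvCn (pvSeedA map M N).2.2 + 1)
          (pvSeedA map M N).1 (pvSeedA map M N).2.1 (pvSeedA map M N).2.2 := rfl
  have hB : solve_alt map M N
      = loopB map M N (pvCn (pvSeedB map M N).1 + 1) (pvSeedB map M N).2 0 (pvSeedB map M N).1 := rfl
  rw [hA, hB, e1, e2, e3]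
  exact pvMain map M N _ _ 0 _ _ hs le_rfl hF
    (by simp only [List.length_map]; omega) (by omega)

-- ===== VERDICT (by name: the statement is the Claim_ definition above) =====
theorem solve_spec : Claim_equal_solve := by
  intro map M N _ _
  unfold Spec_solve
  exact pvEqual map M N
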